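-- pv_equiv track=rewrite | github.com/segdeha/pdxcodeguild | 1. Python/solutions/nfl_teams.py | get_conference_and_division_by_team_name
-- ===== SOURCE A (Python) =====
-- def get_conference_and_division_by_team_name(teams, team_name):
--     """Return a tuple of the conference and division for the given team name or None if there is no match
--
--     >>> NFL = {
--     ...     'AFC': {
--     ...         'East': ['Buffalo Bills', 'Miami Dolphins', 'New England Patriots', 'New York Jets'],
--     ...         'North': ['Baltimore Ravens', 'Cincinnati Bengals', 'Cleveland Browns', 'Pittsburgh Steelers'],
--     ...         'South': ['Houston Texans', 'Indianapolis Colts', 'Jacksonville Jaguars', 'Tennessee Titans'],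
--     ...         'West': ['Denver Broncos', 'Kansas City Chiefs', 'Oakland Raiders', 'San Diego Chargers']
--     ...     },'NFC': {
--     ...         'East': ['Dallas Cowboys', 'New York Giants', 'Philadelphia Eagles', 'Washington Redskins'],
--     ...         'North': ['Chicago Bears', 'Detroit Lions', 'Green Bay Packers', 'Minnesota Vikings'],
--     ...         'South': ['Atlanta Falcons', 'Carolina Panthers', 'New Orleans Saints', 'Tampa Bay Buccaneers'],
--     ...         'West': ['Arizona Cardinals', 'Los Angeles Rams', 'San Francisco 49ers', 'Seattle Seahawks']
--     ...     }
--     ... }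
--
--     >>> get_conference_and_division_by_team_name(NFL, 'New England Patriots')
--     ('AFC', 'East')
--
--     >>> get_conference_and_division_by_team_name(NFL, 'Seattle Seahawks')
--     ('NFC', 'West')
--     """
--
--     for conference in teams.keys():
--         for division in teams[conference].keys():
--             try:
--                 if teams[conference][division].index(team_name) > -1:
--                     return conference, division
--             except ValueError:
--                 continue
--
--     return None, None
-- ===== SOURCE B (Python) =====
-- def get_conference_and_division_by_team_name(teams, team_name):
--     """Build an inverted team -> (conference, division) index in one pass,
--     then answer with a single dict lookup."""
--     lookup = {}
--     for conference, divisions in teams.items():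
--         for division, names in divisions.items():
--             for name in names:
--                 lookup.setdefault(name, (conference, division))
--     return lookup.get(team_name, (None, None))
-- ===== Notes on version B (the rewrite author's own statement) =====
-- stated objective: faster
-- what changed: Replaces the early-exit nested keys()/lookup scan with try/except per division by one pass that builds an inverted team->(conference,division) index via setdefault, then answers with a single dict lookup.
import Mathlib
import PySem

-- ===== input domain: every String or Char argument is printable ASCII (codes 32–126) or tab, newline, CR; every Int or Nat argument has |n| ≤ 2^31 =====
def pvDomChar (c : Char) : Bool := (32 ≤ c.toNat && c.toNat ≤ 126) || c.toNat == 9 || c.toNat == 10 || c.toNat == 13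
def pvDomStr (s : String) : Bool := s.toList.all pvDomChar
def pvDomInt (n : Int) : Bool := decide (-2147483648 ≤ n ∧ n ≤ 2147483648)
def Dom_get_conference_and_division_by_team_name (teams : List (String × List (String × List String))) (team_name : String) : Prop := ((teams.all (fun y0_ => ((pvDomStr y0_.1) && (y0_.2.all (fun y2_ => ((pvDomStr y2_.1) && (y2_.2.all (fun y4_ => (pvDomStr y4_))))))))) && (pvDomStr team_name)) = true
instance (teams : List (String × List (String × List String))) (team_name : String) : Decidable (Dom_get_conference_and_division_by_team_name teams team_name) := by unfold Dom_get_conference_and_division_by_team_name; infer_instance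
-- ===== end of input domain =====

-- B replaces A's early-exit nested scan (with try/except per division) by one pass that
-- builds an inverted team -> (conference, division) index with setdefault, then a single lookup.

-- ===== PORT A =====
-- inner loop: 'for division in teams[conference].keys(): try: if ...index(team_name) > -1: return division'
def pvInnerA (dd : PySem.Dict String (List String)) (ks : List String) (team_name : String) : Option String :=
  match ks with
  | [] => none
  | division :: rest =>
    match PySem.List.index? ((dd.get? division).getD []) team_name with
    | some i => if (i : Int) > -1 then some division else pvInnerA dd rest team_name
    | none => pvInnerA dd rest team_name  -- except ValueError: continue

-- outer loop: 'for conference in teams.keys(): ...'; 'teams[conference]' is a dict lookup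
-- (the key comes from .keys(), so it is always present: .getD [] is never the default)
def pvOuterA (td : PySem.Dict String (List (String × List String))) (ks : List String) (team_name : String) : Option String × Option String :=
  match ks with
  | [] => (none, none)
  | conference :: rest =>
    let dd : PySem.Dict String (List String) := PySem.Dict.mk ((td.get? conference).getD [])
    match pvInnerA dd dd.keys team_name with
    | some d => (some conference, some d)
    | none => pvOuterA td rest team_name

def get_conference_and_division_by_team_name (teams : List (String × List (String × List String))) (team_name : String) : Option String × Option String :=
  pvOuterA (PySem.Dict.mk teams) (PySem.Dict.mk teams).keys team_name

-- ===== PORT B =====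
-- 'lookup.setdefault(name, (conference, division))' over all three nested loops
def pvBuildB (teams : List (String × List (String × List String))) : PySem.Dict String (String × String) :=
  teams.foldl (fun d p =>
    p.2.foldl (fun d q =>
      q.2.foldl (fun d name => d.setdefault name (p.1, q.1)) d) d) PySem.Dict.empty

def get_conference_and_division_by_team_name_alt (teams : List (String × List (String × List String))) (team_name : String) : Option String × Option String :=
  match (pvBuildB teams).get? team_name with
  | some cd => (some cd.1, some cd.2)   -- lookup.get hit
  | none => (none, none)                -- default (None, None)

-- ===== PRECONDITION & SPEC =====
-- A Python dict always converts to an association list with distinct keys; Pre_ restricts the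
-- assoc-list model to such dict-representable inputs (duplicate keys are unreachable from Python).
def Pre_get_conference_and_division_by_team_name (teams : List (String × List (String × List String))) (team_name : String) : Prop :=
  (teams.map (·.1)).Nodup ∧ ∀ p ∈ teams, (p.2.map (·.1)).Nodup
instance (teams : List (String × List (String × List String))) (team_name : String) : Decidable (Pre_get_conference_and_division_by_team_name teams team_name) := by unfold Pre_get_conference_and_division_by_team_name; infer_instance

def pvWitness_get_conference_and_division_by_team_name : (List (String × List (String × List String))) × String :=
  ([("AFC", [("East", ["Buffalo Bills", "Miami Dolphins"])]), ("NFC", [("West", ["Seattle Seahawks"])])], "Seattle Seahawks")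

def Spec_get_conference_and_division_by_team_name (teams : List (String × List (String × List String))) (team_name : String) (out : Option String × Option String) : Prop := out = get_conference_and_division_by_team_name_alt teams team_name
instance (teams : List (String × List (String × List String))) (team_name : String) (out : Option String × Option String) : Decidable (Spec_get_conference_and_division_by_team_name teams team_name out) := by unfold Spec_get_conference_and_division_by_team_name; infer_instance

-- ===== CLAIM (what is proved, stated in full; the proofs are below) =====
def Claim_equal_get_conference_and_division_by_team_name : Prop := ∀ (teams : List (String × List (String × List String))) (team_name : String), Dom_get_conference_and_division_by_team_name teams team_name → Pre_get_conference_and_division_by_team_name teams team_name → Spec_get_conference_and_division_by_team_name teams team_name (get_conference_and_division_by_team_name teams team_name)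

-- ===== LEMMAS AND PROOFS =====

-- the common specification: first (conference, division) whose team list contains the name
def pvFind (teams : List (String × List (String × List String))) (k : String) : Option (String × String) :=
  teams.findSome? (fun p => (p.2.find? (fun q => q.2.contains k)).map (fun q => (p.1, q.1)))

-- B side: the innermost setdefault loop
theorem get?_fold_setdefault (names : List String) (c dv : String)
    (d : PySem.Dict String (String × String)) (k : String) :
    (names.foldl (fun d name => d.setdefault name (c, dv)) d).get? k
      = ((d.get? k).or (if k ∈ names then some (c, dv) else none)) := by
  induction names generalizing d with
  | nil => simp
  | cons n rest ih =>
    simp only [List.foldl_cons, ih]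
    rcases hg : d.get? n with _ | v
    · have hc : d.contains n = false := by
        rw [PySem.Dict.contains_eq_isSome_get?, hg]; rfl
      rw [PySem.Dict.setdefault_of_not_contains _ _ hc]
      by_cases hk : k = n
      · subst hk
        rw [PySem.Dict.get?_insert_self]
        simp [hg]
      · rw [PySem.Dict.get?_insert_of_ne _ _ hk]
        simp [List.mem_cons, hk]
    · have hc : d.contains n = true := by
        rw [PySem.Dict.contains_eq_isSome_get?, hg]; rfl
      rw [PySem.Dict.setdefault_of_contains _ _ hc]
      by_cases hk : k = n
      · subst hk; simp [hg]
      · simp [List.mem_cons, hk]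

-- B side: the division loop
theorem get?_fold_divs (divs : List (String × List String)) (c : String)
    (d : PySem.Dict String (String × String)) (k : String) :
    (divs.foldl (fun d q => q.2.foldl (fun d name => d.setdefault name (c, q.1)) d) d).get? k
      = ((d.get? k).or (((divs.find? (fun q => q.2.contains k)).map (fun q => (c, q.1))))) := by
  induction divs generalizing d with
  | nil => simp
  | cons q rest ih =>
    simp only [List.foldl_cons, ih, get?_fold_setdefault]
    by_cases h : k ∈ q.2
    · simp [h]
    · simp [h]

-- B side: the conference loop
theorem get?_fold_teams (teams : List (String × List (String × List String)))
    (d : PySem.Dict String (String × String)) (k : String) :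
    (teams.foldl (fun d p => p.2.foldl (fun d q => q.2.foldl (fun d name => d.setdefault name (p.1, q.1)) d) d) d).get? k
      = ((d.get? k).or (pvFind teams k)) := by
  induction teams generalizing d with
  | nil => simp [pvFind]
  | cons p rest ih =>
    simp only [List.foldl_cons, ih, get?_fold_divs, pvFind, List.findSome?_cons]
    cases h : (p.2.find? (fun q => q.2.contains k)).map (fun q => (p.1, q.1)) with
    | none => simp
    | some v => simp

theorem B_eq_pvFind (teams : List (String × List (String × List String))) (k : String) :
    get_conference_and_division_by_team_name_alt teams k
      = (match pvFind teams k with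
         | some cd => (some cd.1, some cd.2)
         | none => ((none : Option String), (none : Option String))) := by
  unfold get_conference_and_division_by_team_name_alt pvBuildB
  rw [get?_fold_teams]
  simp

-- A side: the inner key scan over a nodup-key dict equals find? on its items
theorem innerA_eq (dd : PySem.Dict String (List String)) (hnd : dd.keys.Nodup)
    (divs : List (String × List String)) (hsub : ∀ q ∈ divs, q ∈ dd.items) (k : String) :
    pvInnerA dd (divs.map (·.1)) k
      = (divs.find? (fun q => q.2.contains k)).map (·.1) := by
  induction divs with
  | nil => simp [pvInnerA]
  | cons q rest ih =>
    have hq : dd.get? q.1 = some q.2 :=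
      PySem.Dict.get?_of_mem_items dd (by simpa using hsub q (by simp)) hnd
    simp only [List.map_cons, pvInnerA, hq, Option.getD_some]
    by_cases hm : k ∈ q.2
    · rcases Option.isSome_iff_exists.mp ((PySem.List.index?_isSome_iff _ _).mpr hm) with ⟨i, hi⟩
      rw [hi]
      have hgt : ((i : Int) > -1) := by omega
      simp [hgt, hm]
    · rw [(PySem.List.index?_eq_none_iff _ _).mpr hm]
      rw [ih (fun x hx => hsub x (by simp [hx]))]
      simp [hm]

-- A side: the outer key scan equals pvFind
theorem outerA_eq (td : PySem.Dict String (List (String × List String))) (hnd : td.keys.Nodup)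
    (teams : List (String × List (String × List String))) (hsub : ∀ p ∈ teams, p ∈ td.items)
    (hd : ∀ p ∈ teams, (p.2.map (·.1)).Nodup) (k : String) :
    pvOuterA td (teams.map (·.1)) k
      = (match pvFind teams k with
         | some cd => (some cd.1, some cd.2)
         | none => ((none : Option String), (none : Option String))) := by
  induction teams with
  | nil => simp [pvOuterA, pvFind]
  | cons p rest ih =>
    have hp : td.get? p.1 = some p.2 :=
      PySem.Dict.get?_of_mem_items td (by simpa using hsub p (by simp)) hnd
    simp only [List.map_cons, pvOuterA, hp, Option.getD_some]
    have hkeys : (PySem.Dict.mk p.2).keys = p.2.map (·.1) := by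
      simp [PySem.Dict.keys]
    rw [hkeys, innerA_eq (PySem.Dict.mk p.2) (by rw [hkeys]; exact hd p (by simp)) p.2 (fun q hq => hq) k]
    rw [ih (fun x hx => hsub x (by simp [hx])) (fun x hx => hd x (by simp [hx]))]
    simp only [pvFind, List.findSome?_cons]
    cases h : p.2.find? (fun q => q.2.contains k) with
    | none => simp
    | some q => simp

-- ===== VERDICT (by name: the statement is the Claim_ definition above) =====
theorem get_conference_and_division_by_team_name_spec : Claim_equal_get_conference_and_division_by_team_name := by
  intro teams team_name _ hpre
  unfold Spec_get_conference_and_division_by_team_name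
  unfold get_conference_and_division_by_team_name
  have hkeys : (PySem.Dict.mk teams).keys = teams.map (·.1) := by simp [PySem.Dict.keys]
  rw [hkeys, outerA_eq _ (by rw [hkeys]; exact hpre.1) teams (fun p hp => hp) hpre.2 team_name,
    B_eq_pvFind]
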